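-- pv_equiv track=rewrite | github.com/DancingOnAir/LeetcodePythonSolution | array/2399_check_distances_between_same_letters.py | checkDistances1
-- ===== SOURCE A (Python) =====
-- from typing import List
--
-- def checkDistances1(s: str, distance: List[int]) -> bool:
--     m = dict()
--     for i, ch in enumerate(s):
--         if ch in m:
--             if distance[ord(ch) - 97] != i - m[ch] - 1:
--                 return False
--         else:
--             m[ch] = i
--     return True
-- ===== SOURCE B (Python) =====
-- def checkDistances1(s, distance):
--     first = {}
--     for i, ch in enumerate(s):
--         if ch not in first:
--             first[ch] = i
--     return all(distance[ord(ch) - 97] == i - first[ch] - 1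
--                for i, ch in enumerate(s) if first[ch] != i)
-- ===== Notes on version B (the rewrite author's own statement) =====
-- stated objective: alternative
-- what changed: Replaces A's single interleaved scan (dict-in-progress with early return on each repeat) by a two-phase build-then-verify: one pass records each character's first index, then a short-circuiting all() over enumerate checks every later occurrence against that first index.
-- outside the precondition, e.g. on checkDistances1('aazz', [5]): A returns False, B returns False
import Mathlib
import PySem

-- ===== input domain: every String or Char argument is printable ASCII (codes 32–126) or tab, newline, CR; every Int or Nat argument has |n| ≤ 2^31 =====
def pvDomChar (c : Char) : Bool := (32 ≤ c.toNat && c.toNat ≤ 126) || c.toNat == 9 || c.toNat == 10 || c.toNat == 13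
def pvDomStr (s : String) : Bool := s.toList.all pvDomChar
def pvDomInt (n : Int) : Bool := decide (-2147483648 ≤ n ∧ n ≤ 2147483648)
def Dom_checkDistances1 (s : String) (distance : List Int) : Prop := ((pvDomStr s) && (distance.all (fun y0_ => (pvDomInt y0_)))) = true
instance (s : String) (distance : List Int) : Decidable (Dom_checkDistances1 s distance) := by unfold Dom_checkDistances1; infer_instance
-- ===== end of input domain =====

-- B re-implements A as a two-phase build-then-verify (first-index dict built first, then one all() pass);
-- return-value equivalence is proved on Pre_, which excludes inputs where the distance lookup can raise.

-- ===== PORT A =====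
-- A's scan: dict m of first occurrences built while checking each repeat, early return False.
def pvALoop (distance : List Int) : List (Int × Char) → PySem.Dict Char Int → Bool
  | [], _ => true
  | (i, ch) :: rest, m =>
    match PySem.Dict.get? m ch with
    | some j =>
      if PySem.List.pyGetD distance ((ch.toNat : Int) - 97) 0 ≠ i - j - 1 then false
      else pvALoop distance rest m
    | none => pvALoop distance rest (m.insert ch i)

def checkDistances1 (s : String) (distance : List Int) : Bool :=
  pvALoop distance (PySem.List.enumerate s.toList 0) PySem.Dict.empty

-- ===== PORT B =====
-- B's phase 1: record each character's first index.
def pvBFirst : List (Int × Char) → PySem.Dict Char Int → PySem.Dict Char Int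
  | [], m => m
  | (i, ch) :: rest, m =>
    if m.contains ch then pvBFirst rest m else pvBFirst rest (m.insert ch i)

-- B's phase 2: all() over enumerate, checking occurrences after the first (guard `first[ch] != i`).
def checkDistances1_alt (s : String) (distance : List Int) : Bool :=
  let first := pvBFirst (PySem.List.enumerate s.toList 0) PySem.Dict.empty
  (PySem.List.enumerate s.toList 0).all (fun p =>
    if first.getD p.2 0 ≠ p.1 then
      PySem.List.pyGetD distance ((p.2.toNat : Int) - 97) 0 == p.1 - first.getD p.2 0 - 1
    else true)

-- ===== PRECONDITION & SPEC =====
-- Pre_ excludes inputs on which some repeated character's index ord(ch)-97 falls outside Python's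
-- index range for `distance`: there A raises IndexError, except when an earlier mismatch happens to
-- return False before the bad access is reached (an order accident; B short-circuits identically there).
-- (stated as a boolean `all` over the string's characters so the condition is kernel-decidable)
def Pre_checkDistances1 (s : String) (distance : List Int) : Prop :=
  (s.toList.all (fun ch =>
    if 1 < s.toList.count ch then
      decide (PySem.Raise.InRange distance.length ((ch.toNat : Int) - 97))
    else true)) = true
instance (s : String) (distance : List Int) : Decidable (Pre_checkDistances1 s distance) := by
  unfold Pre_checkDistances1; infer_instance
def pvWitness_checkDistances1 : String × List Int := ("aa", [0])

def Spec_checkDistances1 (s : String) (distance : List Int) (out : Bool) : Prop := out = checkDistances1_alt s distance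
instance (s : String) (distance : List Int) (out : Bool) : Decidable (Spec_checkDistances1 s distance out) := by unfold Spec_checkDistances1; infer_instance

-- ===== CLAIM (what is proved, stated in full; the proofs are below) =====
def Claim_equal_checkDistances1 : Prop := ∀ (s : String) (distance : List Int), Dom_checkDistances1 s distance → Pre_checkDistances1 s distance → Spec_checkDistances1 s distance (checkDistances1 s distance)

-- ===== LEMMAS AND PROOFS =====

-- first occurrence (index) of ch in an enumerated list
def pvFo (l : List (Int × Char)) (ch : Char) : Option Int :=
  (l.find? (fun p => p.2 == ch)).map (·.1)

theorem pvFo_cons (i : Int) (c ch : Char) (rest : List (Int × Char)) :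
    pvFo ((i, c) :: rest) ch = if c = ch then some i else pvFo rest ch := by
  by_cases h : c = ch <;> simp [pvFo, h]

theorem pvBFirst_get? (l : List (Int × Char)) (m : PySem.Dict Char Int) (ch : Char) :
    (pvBFirst l m).get? ch =
      match m.get? ch with
      | some j => some j
      | none => pvFo l ch := by
  induction l generalizing m with
  | nil =>
    cases h : m.get? ch <;> simp [pvBFirst, pvFo, h]
  | cons p rest ih =>
    obtain ⟨i, c⟩ := p
    by_cases hc : m.contains c = true
    · rw [show pvBFirst ((i, c) :: rest) m = pvBFirst rest m by
        simp [pvBFirst, hc], ih]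
      cases h : m.get? ch with
      | some j => rfl
      | none =>
        have hcc : c ≠ ch := by
          intro he
          subst he
          rw [PySem.Dict.contains_eq_isSome_get?, h] at hc
          simp at hc
        rw [pvFo_cons, if_neg hcc]
    · rw [show pvBFirst ((i, c) :: rest) m = pvBFirst rest (m.insert c i) by
        simp [pvBFirst, hc], ih]
      have hnone : m.get? c = none := by
        rw [PySem.Dict.contains_eq_isSome_get?] at hc
        cases h : m.get? c with
        | none => rfl
        | some j => rw [h] at hc; simp at hc
      by_cases he : ch = c
      · subst he
        rw [PySem.Dict.get?_insert_self, hnone, pvFo_cons, if_pos rfl]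
      · rw [PySem.Dict.get?_insert_of_ne m i he]
        cases h : m.get? ch with
        | some j => rfl
        | none => rw [pvFo_cons, if_neg (fun hh => he hh.symm)]

theorem pvMain (distance : List Int) (F : PySem.Dict Char Int)
    (l : List (Int × Char)) (m : PySem.Dict Char Int)
    (hpw : l.Pairwise (fun p q => p.1 < q.1))
    (hinv : ∀ p ∈ l, F.get? p.2 =
      match m.get? p.2 with
      | some j => some j
      | none => pvFo l p.2)
    (hne : ∀ p ∈ l, ∀ j, m.get? p.2 = some j → j ≠ p.1) :
    pvALoop distance l m =
      l.all (fun p =>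
        if F.getD p.2 0 ≠ p.1 then
          PySem.List.pyGetD distance ((p.2.toNat : Int) - 97) 0 == p.1 - F.getD p.2 0 - 1
        else true) := by
  induction l generalizing m with
  | nil => simp [pvALoop]
  | cons p rest ih =>
    obtain ⟨i, ch⟩ := p
    rw [List.pairwise_cons] at hpw
    have hF0 := hinv (i, ch) List.mem_cons_self
    rw [List.all_cons]
    cases hm : m.get? ch with
    | some j =>
      rw [show (i, ch).2 = ch from rfl, hm] at hF0
      have hF : F.get? ch = some j := by simpa using hF0
      have hji : j ≠ i := hne (i, ch) List.mem_cons_self j hm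
      have hFD : F.getD ch 0 = j := PySem.Dict.getD_of_get?_eq_some F 0 hF
      rw [show pvALoop distance ((i, ch) :: rest) m =
          (if PySem.List.pyGetD distance ((ch.toNat : Int) - 97) 0 ≠ i - j - 1 then false
           else pvALoop distance rest m) by simp [pvALoop, hm]]
      simp only [hFD]
      rw [if_pos hji]
      by_cases hchk : PySem.List.pyGetD distance ((ch.toNat : Int) - 97) 0 = i - j - 1
      · rw [if_neg (by simp [hchk]), hchk]
        simp only [beq_self_eq_true, Bool.true_and]
        refine ih m hpw.2 ?_ ?_
        · intro q hq
          have h0 := hinv q (List.mem_cons_of_mem _ hq)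
          cases hq2 : m.get? q.2 with
          | some k =>
            rw [hq2] at h0
            simpa using h0
          | none =>
            have hcc : ¬ ch = q.2 := by
              intro he
              rw [← he, hm] at hq2
              cases hq2
            rw [hq2] at h0
            show F.get? q.2 = pvFo rest q.2
            have h1 : F.get? q.2 = pvFo ((i, ch) :: rest) q.2 := by simpa using h0
            rw [h1, pvFo_cons, if_neg hcc]
        · intro q hq k hk
          exact hne q (List.mem_cons_of_mem _ hq) k hk
      · rw [if_pos hchk]
        simp [hchk]
    | none =>
      rw [show (i, ch).2 = ch from rfl, hm] at hF0
      have hF : F.get? ch = some i := by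
        have h1 : F.get? ch = pvFo ((i, ch) :: rest) ch := by simpa using hF0
        rw [h1, pvFo_cons, if_pos rfl]
      have hFD : F.getD ch 0 = i := PySem.Dict.getD_of_get?_eq_some F 0 hF
      rw [show pvALoop distance ((i, ch) :: rest) m =
          pvALoop distance rest (m.insert ch i) by simp [pvALoop, hm]]
      simp only [hFD]
      rw [if_neg (by simp), Bool.true_and]
      refine ih (m.insert ch i) hpw.2 ?_ ?_
      · intro q hq
        by_cases hqc : q.2 = ch
        · rw [hqc, PySem.Dict.get?_insert_self]
          simpa using hF
        · rw [PySem.Dict.get?_insert_of_ne m i hqc]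
          have h0 := hinv q (List.mem_cons_of_mem _ hq)
          cases hq2 : m.get? q.2 with
          | some k =>
            rw [hq2] at h0
            simpa using h0
          | none =>
            rw [hq2] at h0
            show F.get? q.2 = pvFo rest q.2
            have h1 : F.get? q.2 = pvFo ((i, ch) :: rest) q.2 := by simpa using h0
            rw [h1, pvFo_cons, if_neg (fun hh => hqc hh.symm)]
      · intro q hq k hk
        by_cases hqc : q.2 = ch
        · rw [hqc, PySem.Dict.get?_insert_self] at hk
          cases hk
          exact Int.ne_of_lt (hpw.1 q hq)
        · rw [PySem.Dict.get?_insert_of_ne m i hqc] at hk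
          exact hne q (List.mem_cons_of_mem _ hq) k hk

-- ===== VERDICT (by name: the statement is the Claim_ definition above) =====
theorem checkDistances1_spec : Claim_equal_checkDistances1 := by
  intro s distance _ _
  show checkDistances1 s distance = checkDistances1_alt s distance
  unfold checkDistances1 checkDistances1_alt
  refine pvMain distance _ _ _ (PySem.List.pairwise_lt_enumerate s.toList 0) ?_ ?_
  · intro p _
    rw [pvBFirst_get?, PySem.Dict.get?_empty]
  · intro p _ j hj
    rw [PySem.Dict.get?_empty] at hj
    cases hj
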